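-- pv_equiv track=rewrite | github.com/sziff2/AI-tracker-toolv2 | services/section_splitter.py | _extract_uncovered_text
-- ===== SOURCE A (Python) =====
-- def _is_boilerplate(text: str) -> bool:
--     """Check if text is likely boilerplate."""
--     lower = text.lower()
--     boilerplate_signals = [
--         "forward-looking statements",
--         "safe harbor",
--         "this document is not",
--         "legal disclaimer",
--         "important notice",
--         "this report has been prepared",
--     ]
--     return any(signal in lower for signal in boilerplate_signals)
--
-- def _extract_uncovered_text(text: str, covered_ranges: list[tuple[int, int]]) -> str:
--     """Extract text not covered by any detected section, skipping boilerplate."""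
--     if not covered_ranges:
--         return text
--
--     # Sort and merge overlapping ranges
--     sorted_ranges = sorted(covered_ranges)
--     merged = [sorted_ranges[0]]
--     for start, end in sorted_ranges[1:]:
--         if start <= merged[-1][1]:
--             merged[-1] = (merged[-1][0], max(merged[-1][1], end))
--         else:
--             merged.append((start, end))
--
--     # Collect gaps
--     uncovered_parts = []
--     prev_end = 0
--     for start, end in merged:
--         if start > prev_end:
--             gap = text[prev_end:start].strip()
--             if gap and len(gap) > 100 and not _is_boilerplate(gap):
--                 uncovered_parts.append(gap)
--         prev_end = end
--     # Trailing text
--     if prev_end < len(text):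
--         gap = text[prev_end:].strip()
--         if gap and len(gap) > 100 and not _is_boilerplate(gap):
--             uncovered_parts.append(gap)
--
--     return "\n\n".join(uncovered_parts)
-- ===== SOURCE B (Python) =====
-- def _is_boilerplate(text: str) -> bool:
--     """Check if text is likely boilerplate."""
--     lower = text.lower()
--     boilerplate_signals = [
--         "forward-looking statements",
--         "safe harbor",
--         "this document is not",
--         "legal disclaimer",
--         "important notice",
--         "this report has been prepared",
--     ]
--     return any(sig in lower for sig in boilerplate_signals)
--
--
-- def _gap(text: str, lo: int, hi: int):
--     """Strip text[lo:hi]; keep it only if it is a long, non-boilerplate chunk."""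
--     if hi <= lo:
--         return None
--     gap = text[lo:hi].strip()
--     if len(gap) > 100 and not _is_boilerplate(gap):
--         return gap
--     return None
--
--
-- def _extract_uncovered_text(text: str, covered_ranges: list[tuple[int, int]]) -> str:
--     """Single fused sweep: merge ranges and emit the uncovered gaps on the fly."""
--     if not covered_ranges:
--         return text
--
--     ranges = sorted(covered_ranges)
--     parts = []
--     prev_end = 0
--     cur_start, cur_end = ranges[0]
--     for start, end in ranges[1:]:
--         if start <= cur_end:
--             cur_end = max(cur_end, end)
--         else:
--             g = _gap(text, prev_end, cur_start)
--             if g is not None: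
--                 parts.append(g)
--             prev_end = cur_end
--             cur_start, cur_end = start, end
--     g = _gap(text, prev_end, cur_start)
--     if g is not None:
--         parts.append(g)
--     g = _gap(text, cur_end, len(text))
--     if g is not None:
--         parts.append(g)
--     return "\n\n".join(parts)
-- ===== Notes on version B (the rewrite author's own statement) =====
-- stated objective: alternative
-- what changed: B fuses A's two passes (build a merged interval list, then scan it for gaps) into a single sweep over the sorted ranges that emits each uncovered gap as soon as the current merged block closes, via a unified _gap helper and no intermediate merged list.
import Mathlib
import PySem

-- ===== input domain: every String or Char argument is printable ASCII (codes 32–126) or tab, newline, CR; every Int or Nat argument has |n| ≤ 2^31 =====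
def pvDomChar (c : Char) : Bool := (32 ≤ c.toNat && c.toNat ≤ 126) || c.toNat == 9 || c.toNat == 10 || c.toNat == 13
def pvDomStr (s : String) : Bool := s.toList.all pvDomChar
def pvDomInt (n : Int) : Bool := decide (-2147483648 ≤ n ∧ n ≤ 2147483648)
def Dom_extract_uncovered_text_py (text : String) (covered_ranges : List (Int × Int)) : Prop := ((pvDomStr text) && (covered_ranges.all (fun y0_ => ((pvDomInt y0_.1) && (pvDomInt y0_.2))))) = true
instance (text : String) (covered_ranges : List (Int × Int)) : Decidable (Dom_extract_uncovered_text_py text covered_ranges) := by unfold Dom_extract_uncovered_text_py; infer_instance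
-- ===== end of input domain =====

-- B fuses A's two passes (merge ranges into a list, then collect gaps) into one sweep over the
-- sorted ranges that emits each gap as soon as the current merged block closes; return values agree everywhere.

-- ===== PORT A =====
-- shared module helper _is_boilerplate (called by both A and B, as in the Python module)
def pyIsBoilerplate (t : String) : Bool :=
  let lower := PySem.Str.lower t
  [ "forward-looking statements", "safe harbor", "this document is not",
    "legal disclaimer", "important notice", "this report has been prepared"
  ].any (fun sig => PySem.Str.isIn sig lower)

-- A's merge loop: merged = [first]; extend or append (done ++ [cur] plays merged, cur = merged[-1])
def mergeLoopA : List (Int × Int) → (Int × Int) → List (Int × Int) → List (Int × Int)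
  | done, cur, [] => done ++ [cur]
  | done, cur, (s, e) :: rest =>
    if s ≤ cur.2 then mergeLoopA done (cur.1, max cur.2 e) rest
    else mergeLoopA (done ++ [cur]) (s, e) rest

-- A's gap-collection loop body over the merged list (state: uncovered_parts, prev_end)
def gapStepA (text : String) (st : List String × Int) (r : Int × Int) : List String × Int :=
  let parts :=
    if r.1 > st.2 then
      let gap := PySem.Str.strip (PySem.Str.slice text (some st.2) (some r.1))
      if PySem.Str.len gap ≠ 0 ∧ 100 < PySem.Str.len gap ∧ pyIsBoilerplate gap = false then
        st.1 ++ [gap]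
      else st.1
    else st.1
  (parts, r.2)

def extract_uncovered_text_py (text : String) (covered_ranges : List (Int × Int)) : String :=
  if covered_ranges.isEmpty then text
  else
    match PySem.List.sorted2 covered_ranges (fun r => r.1) (fun r => r.2) false with
    | [] => text  -- unreachable: sorted of a nonempty list is nonempty
    | first :: rest =>
      let merged := mergeLoopA [] first rest
      let st := merged.foldl (gapStepA text) ([], 0)
      let parts :=
        if st.2 < PySem.Str.len text then
          let gap := PySem.Str.strip (PySem.Str.slice text (some st.2) none)
          if PySem.Str.len gap ≠ 0 ∧ 100 < PySem.Str.len gap ∧ pyIsBoilerplate gap = false then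
            st.1 ++ [gap]
          else st.1
        else st.1
      PySem.Str.join "\n\n" parts

-- ===== PORT B =====
-- B's helper _gap: strip text[lo:hi], keep only a long non-boilerplate chunk
def pyGapB (text : String) (lo hi : Int) : Option String :=
  if hi ≤ lo then none
  else
    let gap := PySem.Str.strip (PySem.Str.slice text (some lo) (some hi))
    if 100 < PySem.Str.len gap ∧ pyIsBoilerplate gap = false then some gap else none

-- "if g is not None: parts.append(g)"
def appendGapB (parts : List String) : Option String → List String
  | some g => parts ++ [g]
  | none => parts

-- B's single fused sweep (state: parts, prev_end, cur_start, cur_end)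
def sweepB (text : String) : List String → Int → Int → Int → List (Int × Int) → List String × Int × Int × Int
  | parts, prevEnd, curS, curE, [] => (parts, prevEnd, curS, curE)
  | parts, prevEnd, curS, curE, (s, e) :: rest =>
    if s ≤ curE then sweepB text parts prevEnd curS (max curE e) rest
    else sweepB text (appendGapB parts (pyGapB text prevEnd curS)) curE s e rest

def extract_uncovered_text_py_alt (text : String) (covered_ranges : List (Int × Int)) : String :=
  if covered_ranges.isEmpty then text
  else
    match PySem.List.sorted2 covered_ranges (fun r => r.1) (fun r => r.2) false with
    | [] => text  -- unreachable: sorted of a nonempty list is nonempty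
    | (s0, e0) :: rest =>
      let st := sweepB text [] 0 s0 e0 rest
      let parts := appendGapB st.1 (pyGapB text st.2.1 st.2.2.1)
      let parts := appendGapB parts (pyGapB text st.2.2.2 (PySem.Str.len text))
      PySem.Str.join "\n\n" parts

-- ===== PRECONDITION & SPEC =====
def Spec_extract_uncovered_text_py (text : String) (covered_ranges : List (Int × Int)) (out : String) : Prop := out = extract_uncovered_text_py_alt text covered_ranges
instance (text : String) (covered_ranges : List (Int × Int)) (out : String) : Decidable (Spec_extract_uncovered_text_py text covered_ranges out) := by unfold Spec_extract_uncovered_text_py; infer_instance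

-- ===== CLAIM (what is proved, stated in full; the proofs are below) =====
def Claim_equal_extract_uncovered_text_py : Prop := ∀ (text : String) (covered_ranges : List (Int × Int)), Dom_extract_uncovered_text_py text covered_ranges → Spec_extract_uncovered_text_py text covered_ranges (extract_uncovered_text_py text covered_ranges)

-- ===== LEMMAS AND PROOFS =====

-- A's inline "gap and len(gap) > 100 and not boilerplate" append equals B's appendGapB/pyGapB filter
theorem keep_eq (p : List String) (gap : String) :
    (if PySem.Str.len gap ≠ 0 ∧ 100 < PySem.Str.len gap ∧ pyIsBoilerplate gap = false then
      p ++ [gap] else p)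
    = appendGapB p (if 100 < PySem.Str.len gap ∧ pyIsBoilerplate gap = false then some gap else none) := by
  by_cases h : 100 < PySem.Str.len gap ∧ pyIsBoilerplate gap = false
  · have hne : PySem.Str.len gap ≠ 0 := by
      have := h.1; omega
    rw [if_pos ⟨hne, h⟩, if_pos h]; rfl
  · rw [if_neg (fun hc => h hc.2), if_neg h]; rfl

theorem stepA_eq (text : String) (st : List String × Int) (r : Int × Int) :
    gapStepA text st r = (appendGapB st.1 (pyGapB text st.2 r.1), r.2) := by
  unfold gapStepA pyGapB
  by_cases h : r.1 ≤ st.2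
  · rw [if_neg (not_lt.mpr h), if_pos h]; rfl
  · have h' : st.2 < r.1 := lt_of_not_ge h
    rw [if_pos h', if_neg (not_le.mpr h')]
    exact congrArg (·, r.2) (keep_eq st.1 _)

theorem mergeLoopA_acc (rest : List (Int × Int)) :
    ∀ (done : List (Int × Int)) (cur : Int × Int),
      mergeLoopA done cur rest = done ++ mergeLoopA [] cur rest := by
  induction rest with
  | nil => intro done cur; simp [mergeLoopA]
  | cons r t ih =>
    intro done cur
    obtain ⟨s, e⟩ := r
    by_cases h : s ≤ cur.2
    · simp only [mergeLoopA, if_pos h]; exact ih done _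
    · simp only [mergeLoopA, if_neg h, List.nil_append]
      rw [ih (done ++ [cur]), ih [cur], List.append_assoc]

-- the fused sweep computes exactly A's fold over the merged list
theorem sweep_eq (text : String) (rest : List (Int × Int)) :
    ∀ (parts : List String) (prevEnd : Int) (cur : Int × Int),
      (mergeLoopA [] cur rest).foldl (gapStepA text) (parts, prevEnd)
      = (appendGapB (sweepB text parts prevEnd cur.1 cur.2 rest).1
           (pyGapB text (sweepB text parts prevEnd cur.1 cur.2 rest).2.1
             (sweepB text parts prevEnd cur.1 cur.2 rest).2.2.1),
         (sweepB text parts prevEnd cur.1 cur.2 rest).2.2.2) := by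
  induction rest with
  | nil =>
    intro parts prevEnd cur
    simp only [mergeLoopA, sweepB, List.nil_append, List.foldl_cons, List.foldl_nil]
    rw [stepA_eq]
  | cons r t ih =>
    intro parts prevEnd cur
    obtain ⟨s, e⟩ := r
    by_cases h : s ≤ cur.2
    · simp only [mergeLoopA, sweepB, if_pos h]
      exact ih parts prevEnd (cur.1, max cur.2 e)
    · simp only [mergeLoopA, sweepB, if_neg h, List.nil_append]
      rw [mergeLoopA_acc t [cur] (s, e), List.singleton_append, List.foldl_cons, stepA_eq]
      exact ih _ cur.2 (s, e)

-- text[lo:] equals text[lo:len(text)]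
theorem slice_len_eq (s : String) (lo : Int) :
    PySem.Str.slice s (some lo) (some (PySem.Str.len s)) = PySem.Str.slice s (some lo) none := by
  simp [PySem.Str.slice, PySem.Str.len_eq, PySem.List.slice]

-- A's trailing-text branch equals B's final _gap(text, cur_end, len(text)) append
theorem trailing_eq (text : String) (p : List String) (lo : Int) :
    (if lo < PySem.Str.len text then
      let gap := PySem.Str.strip (PySem.Str.slice text (some lo) none)
      if PySem.Str.len gap ≠ 0 ∧ 100 < PySem.Str.len gap ∧ pyIsBoilerplate gap = false then
        p ++ [gap]
      else p
    else p) = appendGapB p (pyGapB text lo (PySem.Str.len text)) := by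
  unfold pyGapB
  by_cases h : PySem.Str.len text ≤ lo
  · rw [if_neg (not_lt.mpr h), if_pos h]; rfl
  · have h' : lo < PySem.Str.len text := lt_of_not_ge h
    rw [if_pos h', if_neg (not_le.mpr h'), slice_len_eq]
    exact keep_eq p _

-- ===== VERDICT (by name: the statement is the Claim_ definition above) =====
theorem extract_uncovered_text_py_spec : Claim_equal_extract_uncovered_text_py := by
  intro text covered_ranges _dom
  unfold Spec_extract_uncovered_text_py extract_uncovered_text_py extract_uncovered_text_py_alt
  by_cases hemp : covered_ranges.isEmpty
  · rw [if_pos hemp, if_pos hemp]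
  · rw [if_neg hemp, if_neg hemp]
    cases hs : PySem.List.sorted2 covered_ranges (fun r => r.1) (fun r => r.2) false with
    | nil => rfl
    | cons first rest =>
      obtain ⟨s0, e0⟩ := first
      simp only
      rw [sweep_eq text rest [] 0 (s0, e0)]
      simp only [trailing_eq]
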